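-- pv_equiv track=rewrite | github.com/Adiiii03/Polymarket-Bot | market_finder.py | _find_up_down_indices
-- ===== SOURCE A (Python) =====
-- def _find_up_down_indices(outcomes: list[str]) -> tuple[int, int]:
--     """
--     Return (up_index, down_index) by scanning outcome names.
--     Falls back to (0, 1) if labels are ambiguous.
--     """
--     up_keywords = {"up", "higher", "yes", "above"}
--     down_keywords = {"down", "lower", "no", "below"}
--
--     up_idx, down_idx = 0, 1  # Default
--
--     for i, outcome in enumerate(outcomes):
--         o = outcome.lower().strip()
--         if o in up_keywords:
--             up_idx = i
--         elif o in down_keywords: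
--             down_idx = i
--
--     return up_idx, down_idx
-- ===== SOURCE B (Python) =====
-- def _find_up_down_indices(outcomes: list[str]) -> tuple[int, int]:
--     """
--     Return (up_index, down_index) by scanning outcome names.
--     Falls back to (0, 1) if labels are ambiguous.
--     """
--     up_keywords = {"up", "higher", "yes", "above"}
--     down_keywords = {"down", "lower", "no", "below"}
--     indexed = list(enumerate(o.lower().strip() for o in outcomes))
--     up_idx = next((i for i, o in reversed(indexed) if o in up_keywords), 0)
--     down_idx = next((i for i, o in reversed(indexed) if o in down_keywords), 1)
--     return up_idx, down_idx
-- ===== Notes on version B (the rewrite author's own statement) =====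
-- stated objective: simpler
-- what changed: Replaces the single stateful elif scan with two independent reverse searches (first match in reverse = last match) over a once-normalized enumerated list, with defaults 0 and 1; safe because the two keyword sets are disjoint.
import Mathlib
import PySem

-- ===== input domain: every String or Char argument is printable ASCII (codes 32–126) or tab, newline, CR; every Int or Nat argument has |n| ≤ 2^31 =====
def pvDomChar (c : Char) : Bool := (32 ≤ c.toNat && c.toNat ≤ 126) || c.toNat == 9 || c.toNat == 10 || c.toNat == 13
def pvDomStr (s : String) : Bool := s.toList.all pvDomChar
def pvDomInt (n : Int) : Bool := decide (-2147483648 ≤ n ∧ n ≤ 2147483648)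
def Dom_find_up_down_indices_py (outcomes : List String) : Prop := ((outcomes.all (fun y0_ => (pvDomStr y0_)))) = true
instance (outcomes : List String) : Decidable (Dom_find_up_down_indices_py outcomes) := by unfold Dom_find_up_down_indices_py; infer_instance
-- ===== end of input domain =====

-- B replaces A's stateful elif scan by two independent reverse searches over a once-normalized list (simpler decomposition; same cost).

-- ===== PORT A =====
def find_up_down_indices_py (outcomes : List String) : Int × Int :=
  let up_keywords : PySem.Set String := PySem.Set.ofList ["up", "higher", "yes", "above"]
  let down_keywords : PySem.Set String := PySem.Set.ofList ["down", "lower", "no", "below"]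
  (PySem.List.enumerate outcomes 0).foldl
    (fun (st : Int × Int) p =>
      let o := PySem.Str.strip (PySem.Str.lower p.2)
      if PySem.Set.contains up_keywords o then (p.1, st.2)
      else if PySem.Set.contains down_keywords o then (st.1, p.1)
      else st)
    (0, 1)

-- ===== PORT B =====
def find_up_down_indices_py_alt (outcomes : List String) : Int × Int :=
  let up_keywords : PySem.Set String := PySem.Set.ofList ["up", "higher", "yes", "above"]
  let down_keywords : PySem.Set String := PySem.Set.ofList ["down", "lower", "no", "below"]
  let indexed := PySem.List.enumerate (outcomes.map (fun o => PySem.Str.strip (PySem.Str.lower o))) 0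
  let up_idx := ((indexed.reverse.find? (fun p => PySem.Set.contains up_keywords p.2)).map (·.1)).getD 0
  let down_idx := ((indexed.reverse.find? (fun p => PySem.Set.contains down_keywords p.2)).map (·.1)).getD 1
  (up_idx, down_idx)

-- ===== PRECONDITION & SPEC =====
def Spec_find_up_down_indices_py (outcomes : List String) (out : Int × Int) : Prop := out = find_up_down_indices_py_alt outcomes
instance (outcomes : List String) (out : Int × Int) : Decidable (Spec_find_up_down_indices_py outcomes out) := by unfold Spec_find_up_down_indices_py; infer_instance

-- ===== CLAIM (what is proved, stated in full; the proofs are below) =====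
def Claim_equal_find_up_down_indices_py : Prop := ∀ (outcomes : List String), Dom_find_up_down_indices_py outcomes → Spec_find_up_down_indices_py outcomes (find_up_down_indices_py outcomes)

-- ===== LEMMAS AND PROOFS =====

-- enumerate commutes with map (on the element component)
theorem pv_enumerate_map (h : String → String) (xs : List String) (s : Int) :
    PySem.List.enumerate (xs.map h) s = (PySem.List.enumerate xs s).map (fun p => (p.1, h p.2)) := by
  induction xs generalizing s with
  | nil => simp [PySem.List.enumerate_nil]
  | cons x xs ih => simp [PySem.List.enumerate_cons, ih]

-- the elif fold with disjoint predicates equals two independent last-match (reverse first-match) searches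
theorem pv_fold_eq_find (f g : String → Bool) (hfg : ∀ o, f o = true → g o = false)
    (l : List (Int × String)) (u d : Int) :
    l.foldl (fun (st : Int × Int) p =>
        if f p.2 then (p.1, st.2) else if g p.2 then (st.1, p.1) else st) (u, d)
    = (((l.reverse.find? (fun p => f p.2)).map (·.1)).getD u,
       ((l.reverse.find? (fun p => g p.2)).map (·.1)).getD d) := by
  induction l using List.reverseRecOn generalizing u d with
  | nil => simp
  | append_singleton l a ih =>
      rw [List.foldl_append, ih u d]
      simp only [List.reverse_append, List.reverse_cons, List.reverse_nil, List.nil_append,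
        List.cons_append, List.find?_cons, List.foldl_cons, List.foldl_nil]
      by_cases hf : f a.2
      · have hg : g a.2 = false := hfg _ hf
        simp [hf, hg]
      · by_cases hg : g a.2 <;> simp [hf, hg]

theorem pv_disjoint (o : String) :
    PySem.Set.contains (PySem.Set.ofList ["up", "higher", "yes", "above"]) o = true →
    PySem.Set.contains (PySem.Set.ofList ["down", "lower", "no", "below"]) o = false := by
  intro h
  simp only [PySem.Set.contains, List.contains_eq_mem, decide_eq_true_eq, PySem.Set.mem_ofList,
    List.mem_cons, List.not_mem_nil, or_false] at h ⊢
  rcases h with rfl | rfl | rfl | rfl <;> decide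

-- ===== VERDICT (by name: the statement is the Claim_ definition above) =====
theorem find_up_down_indices_py_spec : Claim_equal_find_up_down_indices_py := by
  intro outcomes _
  unfold Spec_find_up_down_indices_py find_up_down_indices_py find_up_down_indices_py_alt
  simp only [pv_enumerate_map, List.find?_map, ← List.map_reverse, Option.map_map]
  rw [show (fun (st : Int × Int) (p : Int × String) =>
      let o := PySem.Str.strip (PySem.Str.lower p.2)
      if PySem.Set.contains (PySem.Set.ofList ["up", "higher", "yes", "above"]) o then (p.1, st.2)
      else if PySem.Set.contains (PySem.Set.ofList ["down", "lower", "no", "below"]) o then (st.1, p.1)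
      else st)
    = (fun (st : Int × Int) p =>
      if (fun o => PySem.Set.contains (PySem.Set.ofList ["up", "higher", "yes", "above"]) (PySem.Str.strip (PySem.Str.lower o))) p.2
      then (p.1, st.2)
      else if (fun o => PySem.Set.contains (PySem.Set.ofList ["down", "lower", "no", "below"]) (PySem.Str.strip (PySem.Str.lower o))) p.2
      then (st.1, p.1) else st) from rfl]
  rw [pv_fold_eq_find _ _ (fun o => pv_disjoint (PySem.Str.strip (PySem.Str.lower o)))]
  simp [Function.comp_def]
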